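-- pv_equiv track=rewrite | github.com/Arkane-o7/ClutchChess | server/src/kfchess/ai/arrival_field.py | _knight_time
-- ===== SOURCE A (Python) =====
-- INF_TICKS = 999_999
--
-- def _knight_time(
--     pr: int, pc: int, tr: int, tc: int,
--     tps: int, base_delay: int, cd_ticks: int,
--     board_w: int, board_h: int,
-- ) -> int:
--     """Arrival time for a knight using BFS (up to 2 hops for budget)."""
--     # Knight moves 2 squares per move (L-shape), each taking 2*tps ticks
--     move_ticks = 2 * tps
--
--     # Check 1-hop
--     dr, dc = abs(tr - pr), abs(tc - pc)
--     if (dr, dc) in ((1, 2), (2, 1)):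
--         return base_delay + move_ticks
--
--     # Check 2-hop: enumerate all intermediate squares reachable in 1 hop
--     KNIGHT_OFFSETS = [
--         (-2, -1), (-2, 1), (-1, -2), (-1, 2),
--         (1, -2), (1, 2), (2, -1), (2, 1),
--     ]
--     for dr1, dc1 in KNIGHT_OFFSETS:
--         mr, mc = pr + dr1, pc + dc1
--         if 0 <= mr < board_h and 0 <= mc < board_w:
--             dr2, dc2 = abs(tr - mr), abs(tc - mc)
--             if (dr2, dc2) in ((1, 2), (2, 1)):
--                 return base_delay + move_ticks + cd_ticks + move_ticks
--
--     return INF_TICKS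
-- ===== SOURCE B (Python) =====
-- INF_TICKS = 999_999
--
-- def _knight_time(pr, pc, tr, tc, tps, base_delay, cd_ticks, board_w, board_h):
--     """Build the whole <=2-hop arrival-time field as a dict, then look the target up."""
--     move_ticks = 2 * tps
--     offsets = [(-2, -1), (-2, 1), (-1, -2), (-1, 2),
--                (1, -2), (1, 2), (2, -1), (2, 1)]
--     entries = [((pr + dr, pc + dc), base_delay + move_ticks) for dr, dc in offsets]
--     entries += [((pr + dr + dr2, pc + dc + dc2), base_delay + 2 * move_ticks + cd_ticks)
--                 for dr, dc in offsets
--                 if 0 <= pr + dr < board_h and 0 <= pc + dc < board_w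
--                 for dr2, dc2 in offsets]
--     field = {}
--     for sq, t in entries:
--         field.setdefault(sq, t)
--     return field.get((tr, tc), INF_TICKS)
-- ===== Notes on version B (the rewrite author's own statement) =====
-- stated objective: alternative
-- what changed: Instead of A's staged early-return scans that test the target against each candidate square, B first builds the complete <=2-hop arrival-time field as a dict of (square, time) entries (setdefault keeps the cheaper one-hop time), then answers with a single dict lookup of the target.
import Mathlib
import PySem

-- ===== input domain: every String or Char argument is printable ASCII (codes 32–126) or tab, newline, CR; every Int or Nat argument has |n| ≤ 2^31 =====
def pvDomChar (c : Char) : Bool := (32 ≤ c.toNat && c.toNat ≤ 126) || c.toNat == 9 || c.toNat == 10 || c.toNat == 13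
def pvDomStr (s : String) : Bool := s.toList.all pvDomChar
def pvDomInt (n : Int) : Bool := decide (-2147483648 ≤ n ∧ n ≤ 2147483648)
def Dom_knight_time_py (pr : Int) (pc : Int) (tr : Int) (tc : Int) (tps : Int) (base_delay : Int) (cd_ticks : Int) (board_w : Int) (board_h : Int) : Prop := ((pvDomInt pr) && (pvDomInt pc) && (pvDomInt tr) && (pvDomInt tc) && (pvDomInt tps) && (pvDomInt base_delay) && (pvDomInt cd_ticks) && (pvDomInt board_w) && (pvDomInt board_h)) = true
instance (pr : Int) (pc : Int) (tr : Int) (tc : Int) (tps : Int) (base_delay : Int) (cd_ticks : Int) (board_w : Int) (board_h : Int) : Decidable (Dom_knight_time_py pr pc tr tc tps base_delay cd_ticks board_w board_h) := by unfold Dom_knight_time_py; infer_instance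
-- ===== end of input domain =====

-- B replaces A's early-return target scanning by building the whole ≤2-hop
-- arrival-time field as a dict (setdefault keeps the earlier = cheaper time)
-- and looking the target up once (objective: alternative; same O(1) cost).

-- ===== PORT A =====
-- the 8 knight offsets, in source order
def knightOffsets : List (Int × Int) :=
  [(-2, -1), (-2, 1), (-1, -2), (-1, 2), (1, -2), (1, 2), (2, -1), (2, 1)]

-- A's "for dr1, dc1 in KNIGHT_OFFSETS" loop with its early return (some = returned)
def ktpALoop (pr pc tr tc v2 board_w board_h : Int) : List (Int × Int) → Option Int
  | [] => none
  | (dr1, dc1) :: rest =>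
    let mr := pr + dr1
    let mc := pc + dc1
    if 0 ≤ mr ∧ mr < board_h ∧ 0 ≤ mc ∧ mc < board_w then
      let dr2 := |tr - mr|
      let dc2 := |tc - mc|
      if (dr2 = 1 ∧ dc2 = 2) ∨ (dr2 = 2 ∧ dc2 = 1) then some v2
      else ktpALoop pr pc tr tc v2 board_w board_h rest
    else ktpALoop pr pc tr tc v2 board_w board_h rest

def knight_time_py (pr : Int) (pc : Int) (tr : Int) (tc : Int) (tps : Int) (base_delay : Int) (cd_ticks : Int) (board_w : Int) (board_h : Int) : Int :=
  let move_ticks := 2 * tps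
  let dr := |tr - pr|
  let dc := |tc - pc|
  if (dr = 1 ∧ dc = 2) ∨ (dr = 2 ∧ dc = 1) then base_delay + move_ticks
  else
    match ktpALoop pr pc tr tc (base_delay + move_ticks + cd_ticks + move_ticks) board_w board_h knightOffsets with
    | some v => v
    | none => 999999

-- ===== PORT B =====
def knight_time_py_alt (pr : Int) (pc : Int) (tr : Int) (tc : Int) (tps : Int) (base_delay : Int) (cd_ticks : Int) (board_w : Int) (board_h : Int) : Int :=
  let move_ticks := 2 * tps
  -- one-hop entries, then two-hop entries through in-bounds intermediates
  let entries : List ((Int × Int) × Int) :=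
    knightOffsets.map (fun p => ((pr + p.1, pc + p.2), base_delay + move_ticks))
    ++ knightOffsets.flatMap (fun p =>
        if 0 ≤ pr + p.1 ∧ pr + p.1 < board_h ∧ 0 ≤ pc + p.2 ∧ pc + p.2 < board_w then
          knightOffsets.map (fun q =>
            ((pr + p.1 + q.1, pc + p.2 + q.2), base_delay + 2 * move_ticks + cd_ticks))
        else [])
  -- field = {}; for sq, t in entries: field.setdefault(sq, t)
  let field := entries.foldl (fun d e => d.setdefault e.1 e.2) (PySem.Dict.empty : PySem.Dict (Int × Int) Int)
  field.getD (tr, tc) 999999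

-- ===== PRECONDITION & SPEC =====
def Spec_knight_time_py (pr : Int) (pc : Int) (tr : Int) (tc : Int) (tps : Int) (base_delay : Int) (cd_ticks : Int) (board_w : Int) (board_h : Int) (out : Int) : Prop := out = knight_time_py_alt pr pc tr tc tps base_delay cd_ticks board_w board_h
instance (pr : Int) (pc : Int) (tr : Int) (tc : Int) (tps : Int) (base_delay : Int) (cd_ticks : Int) (board_w : Int) (board_h : Int) (out : Int) : Decidable (Spec_knight_time_py pr pc tr tc tps base_delay cd_ticks board_w board_h out) := by unfold Spec_knight_time_py; infer_instance

-- ===== CLAIM (what is proved, stated in full; the proofs are below) =====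
def Claim_equal_knight_time_py : Prop := ∀ (pr : Int) (pc : Int) (tr : Int) (tc : Int) (tps : Int) (base_delay : Int) (cd_ticks : Int) (board_w : Int) (board_h : Int), Dom_knight_time_py pr pc tr tc tps base_delay cd_ticks board_w board_h → Spec_knight_time_py pr pc tr tc tps base_delay cd_ticks board_w board_h (knight_time_py pr pc tr tc tps base_delay cd_ticks board_w board_h)

-- ===== LEMMAS AND PROOFS =====

-- lookup after folding setdefault over an entry list = first entry with that key, else the start dict
lemma get?_foldl_setdefault (L : List ((Int × Int) × Int)) (d : PySem.Dict (Int × Int) Int) (k : Int × Int) :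
    (L.foldl (fun d e => d.setdefault e.1 e.2) d).get? k =
      match d.get? k with
      | some v => some v
      | none => (L.find? (fun e => e.1 == k)).map Prod.snd := by
  induction L generalizing d with
  | nil => cases h : d.get? k <;> simp_all
  | cons e rest ih =>
    simp only [List.foldl_cons, ih, List.find?_cons]
    by_cases hk : e.1 = k
    · subst hk
      rw [PySem.Dict.get?_setdefault_self]
      cases h : d.get? e.1 <;> simp [h]
    · rw [PySem.Dict.get?_setdefault_of_ne d e.2 (Ne.symm hk)]
      have hb : (e.1 == k) = false := by simpa using hk
      simp [hb]

-- if every value in the list is v, find?-then-snd is "any"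
lemma find?_const_snd (L : List ((Int × Int) × Int)) (p : (Int × Int) × Int → Bool) (v : Int)
    (h : ∀ e ∈ L, e.2 = v) :
    (L.find? p).map Prod.snd = if L.any p then some v else none := by
  induction L with
  | nil => simp
  | cons e rest ih =>
    by_cases hp : p e
    · simp [List.any_cons, hp, h e (by simp)]
    · simp only [List.find?_cons, List.any_cons, hp, Bool.false_or]
      exact ih (fun e he => h e (by simp [he]))

-- hitting (tr,tc) from (r,c) by one of the 8 offsets = the absolute-difference L-shape test
lemma anyHit_iff (tr tc r c : Int) :
    (knightOffsets.any (fun q => (r + q.1, c + q.2) == (tr, tc))) = true ↔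
      ((|tr - r| = 1 ∧ |tc - c| = 2) ∨ (|tr - r| = 2 ∧ |tc - c| = 1)) := by
  simp only [knightOffsets, List.any_cons, List.any_nil, Bool.or_eq_true, beq_iff_eq,
    Prod.mk.injEq]
  constructor <;> intro h <;>
    simp_all [abs_eq (by norm_num : (0:Int) ≤ 1), abs_eq (by norm_num : (0:Int) ≤ 2)] <;>
    omega

-- A's offset loop as a boolean "any" over the offsets
lemma ktpALoop_eq_any (pr pc tr tc v bw bh : Int) (L : List (Int × Int)) :
    ktpALoop pr pc tr tc v bw bh L =
      (if L.any (fun p =>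
          decide (0 ≤ pr + p.1 ∧ pr + p.1 < bh ∧ 0 ≤ pc + p.2 ∧ pc + p.2 < bw) &&
          (knightOffsets.any (fun q => (pr + p.1 + q.1, pc + p.2 + q.2) == (tr, tc))))
        then some v else none) := by
  induction L with
  | nil => rfl
  | cons e rest ih =>
    obtain ⟨dr1, dc1⟩ := e
    simp only [List.any_cons]
    by_cases hb : 0 ≤ pr + dr1 ∧ pr + dr1 < bh ∧ 0 ≤ pc + dc1 ∧ pc + dc1 < bw
    · have hbd : decide (0 ≤ pr + dr1 ∧ pr + dr1 < bh ∧ 0 ≤ pc + dc1 ∧ pc + dc1 < bw) = true :=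
        decide_eq_true hb
      by_cases hp : (|tr - (pr + dr1)| = 1 ∧ |tc - (pc + dc1)| = 2) ∨
          (|tr - (pr + dr1)| = 2 ∧ |tc - (pc + dc1)| = 1)
      · have hq := (anyHit_iff tr tc (pr + dr1) (pc + dc1)).2 hp
        simp [ktpALoop, hb, hp, hq]
      · have hq : (knightOffsets.any (fun q => (pr + dr1 + q.1, pc + dc1 + q.2) == (tr, tc))) = false := by
          rw [Bool.eq_false_iff]
          intro hc
          exact hp ((anyHit_iff tr tc (pr + dr1) (pc + dc1)).1 hc)
        simp only [hq, Bool.and_false, Bool.false_or]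
        simpa [ktpALoop, hb, hp] using ih
    · have hbd : decide (0 ≤ pr + dr1 ∧ pr + dr1 < bh ∧ 0 ≤ pc + dc1 ∧ pc + dc1 < bw) = false :=
        decide_eq_false hb
      simp only [hbd, Bool.false_and, Bool.false_or]
      simpa [ktpALoop, hb] using ih

-- ===== VERDICT (by name: the statement is the Claim_ definition above) =====
theorem knight_time_py_spec : Claim_equal_knight_time_py := by
  intro pr pc tr tc tps bd cd bw bh _
  unfold Spec_knight_time_py knight_time_py knight_time_py_alt
  simp only [PySem.Dict.getD, get?_foldl_setdefault, PySem.Dict.get?_empty, List.find?_append]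
  set L1 := knightOffsets.map (fun p => ((pr + p.1, pc + p.2), bd + 2 * tps)) with hL1
  set L2 := knightOffsets.flatMap (fun p =>
      if 0 ≤ pr + p.1 ∧ pr + p.1 < bh ∧ 0 ≤ pc + p.2 ∧ pc + p.2 < bw then
        knightOffsets.map (fun q =>
          ((pr + p.1 + q.1, pc + p.2 + q.2), bd + 2 * (2 * tps) + cd))
      else []) with hL2
  have hfind1 : (L1.find? (fun e => e.1 == (tr, tc))).map Prod.snd =
      if L1.any (fun e => e.1 == (tr, tc)) then some (bd + 2 * tps) else none := by
    apply find?_const_snd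
    intro e he
    simp only [hL1, List.mem_map] at he
    obtain ⟨p, _, rfl⟩ := he
    rfl
  have hany1 : (L1.any (fun e => e.1 == (tr, tc))) =
      (knightOffsets.any (fun q => (pr + q.1, pc + q.2) == (tr, tc))) := by
    rw [hL1, List.any_map]
    exact List.any_congr rfl (fun a => rfl)
  have hfind2 : (L2.find? (fun e => e.1 == (tr, tc))).map Prod.snd =
      if L2.any (fun e => e.1 == (tr, tc)) then some (bd + 2 * (2 * tps) + cd) else none := by
    apply find?_const_snd
    intro e he
    simp only [hL2, List.mem_flatMap] at he
    obtain ⟨p, _, he⟩ := he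
    split at he
    · simp only [List.mem_map] at he
      obtain ⟨q, _, rfl⟩ := he
      rfl
    · simp at he
  have hany2 : (L2.any (fun e => e.1 == (tr, tc))) =
      (knightOffsets.any (fun p =>
        decide (0 ≤ pr + p.1 ∧ pr + p.1 < bh ∧ 0 ≤ pc + p.2 ∧ pc + p.2 < bw) &&
        (knightOffsets.any (fun q => (pr + p.1 + q.1, pc + p.2 + q.2) == (tr, tc))))) := by
    rw [hL2, List.any_flatMap]
    refine List.any_congr rfl ?_
    intro p
    by_cases hb : 0 ≤ pr + p.1 ∧ pr + p.1 < bh ∧ 0 ≤ pc + p.2 ∧ pc + p.2 < bw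
    · rw [if_pos hb, List.any_map, decide_eq_true hb, Bool.true_and]
      rfl
    · rw [if_neg hb, decide_eq_false hb, Bool.false_and]
      rfl
  by_cases h1 : (|tr - pr| = 1 ∧ |tc - pc| = 2) ∨ (|tr - pr| = 2 ∧ |tc - pc| = 1)
  · -- one-hop case: the first entry block contains the target
    have ha : (L1.any (fun e => e.1 == (tr, tc))) = true := by
      rw [hany1]; exact (anyHit_iff tr tc pr pc).2 h1
    rw [if_pos h1]
    obtain ⟨e, hfe⟩ : ∃ e, L1.find? (fun e => e.1 == (tr, tc)) = some e := by
      rcases hf : L1.find? (fun e => e.1 == (tr, tc)) with _ | e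
      · simp [hf, ha] at hfind1
      · exact ⟨e, hf⟩
    have he2 : e.2 = bd + 2 * tps := by
      rw [hfe, if_pos ha] at hfind1; simpa using hfind1
    simp [hfe, he2]
  · -- no one-hop: the first block misses, fall through to the two-hop block
    have ha : (L1.any (fun e => e.1 == (tr, tc))) = false := by
      rw [hany1, Bool.eq_false_iff]
      intro hc
      exact h1 ((anyHit_iff tr tc pr pc).1 hc)
    have hf1 : L1.find? (fun e => e.1 == (tr, tc)) = none := by
      rcases hf : L1.find? (fun e => e.1 == (tr, tc)) with _ | e
      · exact hf
      · rw [hf, if_neg (by simp [ha])] at hfind1; simp at hfind1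
    rw [if_neg h1, hf1, ktpALoop_eq_any, Option.none_or]
    by_cases h2 : (knightOffsets.any (fun p =>
        decide (0 ≤ pr + p.1 ∧ pr + p.1 < bh ∧ 0 ≤ pc + p.2 ∧ pc + p.2 < bw) &&
        (knightOffsets.any (fun q => (pr + p.1 + q.1, pc + p.2 + q.2) == (tr, tc))))) = true
    · have hb2 : (L2.any (fun e => e.1 == (tr, tc))) = true := by rw [hany2]; exact h2
      obtain ⟨e, hfe⟩ : ∃ e, L2.find? (fun e => e.1 == (tr, tc)) = some e := by
        rcases hf : L2.find? (fun e => e.1 == (tr, tc)) with _ | e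
        · simp [hf, hb2] at hfind2
        · exact ⟨e, hf⟩
      have he2 : e.2 = bd + 2 * (2 * tps) + cd := by
        rw [hfe, if_pos hb2] at hfind2; simpa using hfind2
      rw [if_pos h2, hfe]
      simp only [Option.map_some, Option.getD_some, he2]
      ring
    · have hb2 : (L2.any (fun e => e.1 == (tr, tc))) = false := by
        rw [hany2]; exact Bool.eq_false_iff.2 h2
      have hf2 : L2.find? (fun e => e.1 == (tr, tc)) = none := by
        rcases hf : L2.find? (fun e => e.1 == (tr, tc)) with _ | e
        · exact hf
        · rw [hf, if_neg (by simp [hb2])] at hfind2; simp at hfind2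
      rw [if_neg h2, hf2]
      rfl
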